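-- pv_equiv track=rewrite | github.com/boris-kz/CogAlg | CAclasses.py | lateralComp
-- ===== SOURCE A (Python) =====
-- from collections import deque
--
-- rng = 1                 # number of pixels compared to each pixel in four directions
--
-- max_index = rng - 1     # max index of rng_dert1_ and rng_dert2_
--
-- min_coord = rng * 2 - 1 # min x and y for form_P input: der2 from comp over rng
--
-- def lateralComp(pixel_):
--     ''' Comparison over x coordinate,
--      within rng of consecutive pixels on each line '''
--     # init:
--     dert1_ = []
--     rng_dert1_ = deque(maxlen=rng)  # incomplete dert1s, within rng from input pixel: summation range < rng
--     rng_dert1_.append((0, 0))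
--     # main:
--     for x, p in enumerate(pixel_):  # pixel p is compared to rng of prior pixels within horizontal line, summing d per prior pixel
--         back_d = 0
--         for index, (pri_p, d) in enumerate(rng_dert1_):
--             id = p - pri_p
--             d += id
--             back_d += id
--             if index < max_index:
--                 rng_dert1_[index] = (pri_p, d)
--             elif x > min_coord:  # after pri_p comp over rng
--                 dert1_.append((pri_p, d))  # completed bilateral tuple is transferred from rng_dert_ to dert_
--         rng_dert1_.appendleft((p, back_d))
--     # last incomplete rng_dert1_ in line are discarded, vs. dert1_ += reversed(rng_dert1_)
--     return dert1_
-- ===== SOURCE B (Python) =====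
-- def lateralComp(pixel_):
--     """Central differences: with rng=1 each completed dert is
--     (pixel_[i], pixel_[i+1] - pixel_[i-1]) for interior pixels."""
--     return [(p, nxt - prv) for prv, p, nxt in zip(pixel_, pixel_[1:], pixel_[2:])]
-- ===== Notes on version B (the rewrite author's own statement) =====
-- stated objective: simpler
-- what changed: Replaces the deque of incomplete derts with incremental difference summation by a one-line zip over three offsets of the list, computed from the observation that with rng=1 the completed derts are exactly the central differences (pixel_[i], pixel_[i+1]-pixel_[i-1]).
import Mathlib
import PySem

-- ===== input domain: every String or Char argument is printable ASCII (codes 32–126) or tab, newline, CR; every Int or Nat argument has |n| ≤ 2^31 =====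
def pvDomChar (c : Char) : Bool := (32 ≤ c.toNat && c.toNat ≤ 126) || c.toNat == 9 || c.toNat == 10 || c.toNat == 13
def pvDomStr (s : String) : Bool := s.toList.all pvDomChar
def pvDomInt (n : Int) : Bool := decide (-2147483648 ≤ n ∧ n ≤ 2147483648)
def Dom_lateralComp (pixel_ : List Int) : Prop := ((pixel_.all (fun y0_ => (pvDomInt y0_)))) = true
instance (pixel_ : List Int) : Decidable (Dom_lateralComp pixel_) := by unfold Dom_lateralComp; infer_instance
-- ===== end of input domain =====

-- B replaces A's deque of incomplete derts and incremental d-summation with a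
-- one-line zip over three offsets of the list (central differences); objective: simpler.

-- ===== PORT A =====
-- module constants: rng = 1, max_index = rng - 1 = 0, min_coord = rng * 2 - 1 = 1

-- inner `for index, (pri_p, d) in enumerate(rng_dert1_)` loop body; state is
-- (dert1_, rng_dert1_ (the mutable deque), back_d)
def lcInner (x p : Int) (s : List (Int × Int) × List (Int × Int) × Int)
    (ipd : Int × Int × Int) : List (Int × Int) × List (Int × Int) × Int :=
  let index := ipd.1
  let pri_p := ipd.2.1
  let d := ipd.2.2 + (p - pri_p)       -- id = p - pri_p; d += id
  let back_d := s.2.2 + (p - pri_p)    -- back_d += id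
  if index < (1 : Int) - 1 then        -- index < max_index
    (s.1, s.2.1.set index.toNat (pri_p, d), back_d)
  else if x > (1 : Int) * 2 - 1 then   -- x > min_coord
    (s.1 ++ [(pri_p, d)], s.2.1, back_d)
  else
    (s.1, s.2.1, back_d)

-- outer `for x, p in enumerate(pixel_)` body; state is (dert1_, rng_dert1_)
def lcStep (st : List (Int × Int) × List (Int × Int)) (xp : Int × Int) :
    List (Int × Int) × List (Int × Int) :=
  let inner := (PySem.List.enumerate st.2 0).foldl (lcInner xp.1 xp.2) (st.1, st.2, 0)
  -- rng_dert1_.appendleft((p, back_d)) on a deque with maxlen = rng = 1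
  (inner.1, ((xp.2, inner.2.2) :: inner.2.1).take (1 : Int).toNat)

def lateralComp (pixel_ : List Int) : List (Int × Int) :=
  ((PySem.List.enumerate pixel_ 0).foldl lcStep ([], [((0 : Int), (0 : Int))])).1

-- ===== PORT B =====
def lateralComp_alt (pixel_ : List Int) : List (Int × Int) :=
  List.zipWith3 (fun prv p nxt => (p, nxt - prv))
    pixel_ (PySem.List.slice pixel_ (some 1) none) (PySem.List.slice pixel_ (some 2) none)

-- ===== PRECONDITION & SPEC =====
def Spec_lateralComp (pixel_ : List Int) (out : List (Int × Int)) : Prop := out = lateralComp_alt pixel_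
instance (pixel_ : List Int) (out : List (Int × Int)) : Decidable (Spec_lateralComp pixel_ out) := by unfold Spec_lateralComp; infer_instance

-- ===== CLAIM (what is proved, stated in full; the proofs are below) =====
def Claim_equal_lateralComp : Prop := ∀ (pixel_ : List Int), Dom_lateralComp pixel_ → Spec_lateralComp pixel_ (lateralComp pixel_)

-- ===== LEMMAS AND PROOFS =====

-- the list of completed derts A appends while folding over the rest of the line,
-- starting from deque content (q, dq)
def hAux : List Int → Int → Int → List (Int × Int)
  | [], _, _ => []
  | p :: rest, q, dq => (q, dq + (p - q)) :: hAux rest p (p - q)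

-- the deque content after folding over the rest of the line
def tAux : List Int → Int → Int → Int × Int
  | [], q, dq => (q, dq)
  | p :: rest, q, _ => tAux rest p (p - q)

lemma lcStep_eval (dert : List (Int × Int)) (q dq x p : Int) :
    lcStep (dert, [(q, dq)]) (x, p) =
      ((if x > 1 then dert ++ [(q, dq + (p - q))] else dert), [(p, p - q)]) := by
  simp [lcStep, lcInner, PySem.List.enumerate_cons, PySem.List.enumerate_nil]
  split_ifs <;> simp_all

lemma foldA (l : List Int) : ∀ (k : Int) (dert : List (Int × Int)) (q dq : Int), 1 < k →
    (PySem.List.enumerate l k).foldl lcStep (dert, [(q, dq)]) =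
      (dert ++ hAux l q dq, [tAux l q dq]) := by
  induction l with
  | nil => intro k dert q dq _; simp [PySem.List.enumerate_nil, hAux, tAux]
  | cons p rest ih =>
    intro k dert q dq hk
    rw [PySem.List.enumerate_cons]
    simp only [List.foldl_cons]
    rw [lcStep_eval, if_pos hk, ih (k + 1) _ p (p - q) (by omega)]
    simp [hAux, tAux]

lemma hZip (rest : List Int) : ∀ (a b : Int),
    hAux rest b (b - a) =
      List.zipWith3 (fun prv p nxt => (p, nxt - prv)) (a :: b :: rest) (b :: rest) rest := by
  induction rest with
  | nil => intro a b; simp [hAux, List.zipWith3]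
  | cons c rest' ih =>
    intro a b
    simp only [hAux, List.zipWith3, ih b c]
    have h : b - a + (c - b) = c - a := by ring
    rw [h]

-- ===== VERDICT (by name: the statement is the Claim_ definition above) =====
theorem lateralComp_spec : Claim_equal_lateralComp := by
  intro pixel_ _
  unfold Spec_lateralComp lateralComp lateralComp_alt
  match pixel_ with
  | [] => simp [PySem.List.enumerate_nil, List.zipWith3]
  | [a] =>
    simp [PySem.List.enumerate_cons, PySem.List.enumerate_nil, lcStep_eval,
      PySem.List.slice_from_one, List.zipWith3]
  | a :: b :: rest =>
    rw [PySem.List.enumerate_cons, PySem.List.enumerate_cons]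
    simp only [List.foldl_cons]
    rw [lcStep_eval, lcStep_eval, if_neg (by norm_num), if_neg (by norm_num),
      foldA rest (0 + 1 + 1) [] b (b - a) (by norm_num)]
    rw [PySem.List.slice_from_one, show ((2:Int)) = ((2:Nat):Int) by norm_num,
      PySem.List.slice_from_natCast]
    simp [hZip rest a b]
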